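-- pv_equiv track=rewrite | github.com/alessiomrusso/SeekQL | app/backend/queries.py | escape_lucene
-- ===== SOURCE A (Python) =====
-- def escape_lucene(s: str) -> str:
--     """Escape Lucene query_string reserved characters in a plain term."""
--     if not s:
--         return s
--     s = s.replace("\\", "\\\\")
--     special = ['+', '-', '&&', '||', '!', '(', ')', '{', '}', '[', ']', '^', '"', '~', '*', '?', ':', '/']
--     for ch in special:
--         s = s.replace(ch, '\\' + ch)
--     return s
-- ===== SOURCE B (Python) =====
-- def escape_lucene(s: str) -> str:
--     """Escape Lucene query_string reserved characters in a single left-to-right scan."""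
--     singles = set('+-!(){}[]^"~*?:/')
--     out = []
--     i = 0
--     n = len(s)
--     while i < n:
--         c = s[i]
--         if c == '\\':
--             out.append('\\\\')
--             i += 1
--         elif s[i:i+2] in ('&&', '||'):
--             out.append('\\' + s[i:i+2])
--             i += 2
--         elif c in singles:
--             out.append('\\' + c)
--             i += 1
--         else:
--             out.append(c)
--             i += 1
--     return ''.join(out)
-- ===== Notes on version B (the rewrite author's own statement) =====
-- stated objective: alternative
-- what changed: Replaces A's 19 sequential str.replace passes over the whole string with a single left-to-right scan that emits the escaped form of each character (with a two-char lookahead for '&&'/'||') and joins once; one pass and no intermediate strings, though A's C-implemented replace is faster in CPython wall time.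
import Mathlib
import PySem

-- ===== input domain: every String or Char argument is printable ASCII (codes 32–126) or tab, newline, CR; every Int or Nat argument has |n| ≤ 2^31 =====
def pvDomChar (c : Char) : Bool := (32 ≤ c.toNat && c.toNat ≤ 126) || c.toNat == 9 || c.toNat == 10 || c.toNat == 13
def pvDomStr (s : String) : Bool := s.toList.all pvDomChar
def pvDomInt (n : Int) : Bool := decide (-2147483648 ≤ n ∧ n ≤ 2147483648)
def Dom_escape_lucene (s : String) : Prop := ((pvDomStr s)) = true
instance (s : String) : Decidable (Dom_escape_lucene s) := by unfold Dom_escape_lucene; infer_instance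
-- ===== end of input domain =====

-- B replaces A's 19 sequential str.replace passes with a single left-to-right scan (two-char lookahead for '&&'/'||'); objective: alternative (one pass, no intermediate strings).

-- ===== PORT A =====
-- A: s.replace("\\","\\\\"), then for each special ch, s = s.replace(ch, '\'+ch), via foldl.
def escape_lucene (s : String) : String :=
  if PySem.Str.len s = 0 then s
  else
    let s1 := PySem.Str.replace s "\\" "\\\\"
    List.foldl
      (fun acc ch => PySem.Str.replace acc ch (String.ofList ('\\' :: ch.toList)))
      s1
      ["+", "-", "&&", "||", "!", "(", ")", "{", "}", "[", "]", "^", "\"", "~", "*", "?", ":", "/"]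

-- ===== PORT B =====
-- B's single-char special set (as in Source B: set('+-!(){}[]^"~*?:/'))
def luceneSingles : List Char := ['+', '-', '!', '(', ')', '{', '}', '[', ']', '^', '"', '~', '*', '?', ':', '/']

-- the while loop of Source B: at each position, backslash first, then the two-char
-- lookahead s[i:i+2] ∈ {&&, ||}, then single specials, else copy.
def luceneScan : List Char → List Char
  | [] => []
  | a :: b :: t =>
      if a = '\\' then '\\' :: '\\' :: luceneScan (b :: t)
      else if (a = '&' ∧ b = '&') ∨ (a = '|' ∧ b = '|') then '\\' :: a :: b :: luceneScan t
      else if a ∈ luceneSingles then '\\' :: a :: luceneScan (b :: t)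
      else a :: luceneScan (b :: t)
  | [a] =>
      if a = '\\' then ['\\', '\\']
      else if a ∈ luceneSingles then ['\\', a]
      else [a]

def escape_lucene_alt (s : String) : String :=
  String.ofList (luceneScan s.toList)

-- ===== PRECONDITION & SPEC =====
def Spec_escape_lucene (s : String) (out : String) : Prop := out = escape_lucene_alt s
instance (s : String) (out : String) : Decidable (Spec_escape_lucene s out) := by unfold Spec_escape_lucene; infer_instance

-- ===== CLAIM (what is proved, stated in full; the proofs are below) =====
def Claim_equal_escape_lucene : Prop := ∀ (s : String), Dom_escape_lucene s → Spec_escape_lucene s (escape_lucene s)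

-- ===== LEMMAS AND PROOFS =====

-- proof-side characterisations of A's replace passes
def repl1 (c : Char) (l : List Char) : List Char :=
  l.flatMap (fun x => if x = c then ['\\', x] else [x])

def scan2 (x : Char) : List Char → List Char
  | a :: b :: t => if a = x ∧ b = x then '\\' :: a :: b :: scan2 x t else a :: scan2 x (b :: t)
  | l => l

theorem repl1_cons (c a : Char) (l : List Char) :
    repl1 c (a :: l) = (if a = c then ['\\', a] else [a]) ++ repl1 c l := by
  simp [repl1]

theorem scan2_nil (x : Char) : scan2 x [] = [] := rfl

theorem scan2_single (x a : Char) : scan2 x [a] = [a] := rfl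

theorem scan2_pair (x : Char) (t : List Char) :
    scan2 x (x :: x :: t) = '\\' :: x :: x :: scan2 x t := by
  simp [scan2]

theorem scan2_cons_ne (x a : Char) (h : a ≠ x) (l : List Char) :
    scan2 x (a :: l) = a :: scan2 x l := by
  cases l with
  | nil => rfl
  | cons b t => simp [scan2, h]

theorem scan2_cons_head (x : Char) (l : List Char) (h : l.head? ≠ some x) :
    scan2 x (x :: l) = x :: scan2 x l := by
  cases l with
  | nil => rfl
  | cons b t =>
      have hb : b ≠ x := by simpa using h
      simp [scan2, hb]

-- replace with a single-char pattern is repl1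
theorem replace_go_single (c : Char) (l acc : List Char) (fuel : Nat) (h : l.length ≤ fuel) :
    PySem.Chars.replace.go [c] ['\\', c] fuel l acc = acc.reverse ++ repl1 c l := by
  induction fuel generalizing l acc with
  | zero =>
      have : l = [] := by cases l <;> simp_all
      subst this; simp [PySem.Chars.replace.go, repl1]
  | succ n ih =>
      cases l with
      | nil => simp [PySem.Chars.replace.go, repl1]
      | cons a t =>
          by_cases ha : a = c
          · subst ha
            have hp : List.isPrefixOf [a] (a :: t) = true := by simp [List.isPrefixOf]
            have hlen : t.length ≤ n := by
              simp only [List.length_cons] at h; omega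
            simp only [PySem.Chars.replace.go, hp, if_pos]
            rw [show List.drop [a].length (a :: t) = t by simp]
            rw [ih _ _ hlen]
            simp [repl1_cons]
          · have hp : List.isPrefixOf [c] (a :: t) = false := by
              simp [List.isPrefixOf]
              exact fun hh => ha hh.symm
            have hlen : t.length ≤ n := by
              simp only [List.length_cons] at h; omega
            simp only [PySem.Chars.replace.go, hp]
            rw [ih _ _ hlen]
            simp [repl1_cons, ha]

theorem replace_single (c : Char) (l : List Char) :
    PySem.Chars.replace l [c] ['\\', c] = repl1 c l := by
  simp [PySem.Chars.replace]
  simpa using replace_go_single c l [] l.length (le_refl _)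

-- replace with a doubled-char pattern is scan2
theorem replace_go_double (x : Char) (l acc : List Char) (fuel : Nat) (h : l.length ≤ fuel) :
    PySem.Chars.replace.go [x, x] ['\\', x, x] fuel l acc = acc.reverse ++ scan2 x l := by
  induction fuel generalizing l acc with
  | zero =>
      have : l = [] := by cases l <;> simp_all
      subst this; simp [PySem.Chars.replace.go, scan2_nil]
  | succ n ih =>
      cases l with
      | nil => simp [PySem.Chars.replace.go, scan2_nil]
      | cons a t =>
          cases t with
          | nil =>
              have hp : List.isPrefixOf [x, x] [a] = false := by simp [List.isPrefixOf]
              simp only [PySem.Chars.replace.go, hp]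
              rw [ih [] (a :: acc) (Nat.zero_le n)]
              simp [scan2_single, scan2_nil]
          | cons b t' =>
              by_cases hab : a = x ∧ b = x
              · obtain ⟨ha, hb⟩ := hab
                have hp : List.isPrefixOf [x, x] (a :: b :: t') = true := by
                  rw [ha, hb]; simp [List.isPrefixOf]
                have ht' : t'.length ≤ n := by
                  simp only [List.length_cons] at h; omega
                simp only [PySem.Chars.replace.go, hp, if_pos]
                rw [show List.drop [x,x].length (a :: b :: t') = t' by simp]
                rw [ih _ _ ht']
                rw [ha, hb, scan2_pair]
                simp
              · have hp : List.isPrefixOf [x, x] (a :: b :: t') = false := by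
                  by_contra hc
                  have : [x, x] <+: (a :: b :: t') := by
                    rw [← List.isPrefixOf_iff_prefix]
                    cases hxx : List.isPrefixOf [x, x] (a :: b :: t') with
                    | true => rfl
                    | false => exact absurd hxx hc
                  obtain ⟨r, hr⟩ := this
                  simp at hr
                  exact hab ⟨hr.1.symm, hr.2.1.symm⟩
                have hlen : (b :: t').length ≤ n := by
                  simp only [List.length_cons] at h ⊢; omega
                simp only [PySem.Chars.replace.go, hp]
                rw [ih _ _ hlen]
                have heq : scan2 x (a :: b :: t') = a :: scan2 x (b :: t') := by
                  simp [scan2, hab]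
                simp [heq]

theorem replace_double (x : Char) (l : List Char) :
    PySem.Chars.replace l [x, x] ['\\', x, x] = scan2 x l := by
  simp [PySem.Chars.replace]
  simpa using replace_go_double x l [] l.length (le_refl _)

-- the full composed A-side pipeline on char lists
def aChain (l : List Char) : List Char :=
  repl1 '/' (repl1 ':' (repl1 '?' (repl1 '*' (repl1 '~' (repl1 '"' (repl1 '^'
    (repl1 ']' (repl1 '[' (repl1 '}' (repl1 '{' (repl1 ')' (repl1 '('
    (repl1 '!' (scan2 '|' (scan2 '&' (repl1 '-' (repl1 '+' (repl1 '\\' l))))))))))))))))))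

-- head of the first three repl1 passes stays ≠ y for y ∉ {'\','+','-'} ∪ outputs
theorem head_repl3_ne (y : Char) (hy1 : y ≠ '\\') (t : List Char) (h : t.head? ≠ some y) :
    (repl1 '-' (repl1 '+' (repl1 '\\' t))).head? ≠ some y := by
  cases t with
  | nil => simp [repl1]
  | cons d t' =>
      have hd : d ≠ y := by simpa using h
      have hy1' : ('\\' : Char) ≠ y := Ne.symm hy1
      simp only [repl1_cons]
      by_cases h1 : d = '\\'
      · subst h1; simp [repl1_cons, hy1']
      · by_cases h2 : d = '+'
        · subst h2; simp [repl1_cons, hy1']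
        · by_cases h3 : d = '-'
          · subst h3; simp [repl1_cons, hy1']
          · simp [h1, h2, h3, repl1_cons, hd]

theorem head_scan2_ne (x y : Char) (hy : y ≠ '\\') (l : List Char) (h : l.head? ≠ some y) :
    (scan2 x l).head? ≠ some y := by
  cases l with
  | nil => simp [scan2_nil]
  | cons a t =>
      have ha : a ≠ y := by simpa using h
      cases t with
      | nil => simpa [scan2_single] using ha
      | cons b t' =>
          by_cases hab : a = x ∧ b = x
          · obtain ⟨h1, h2⟩ := hab; subst h1; subst h2
            simp [scan2_pair, Ne.symm hy]
          · have : scan2 x (a :: b :: t') = a :: scan2 x (b :: t') := by simp [scan2, hab]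
            simp [this, ha]

-- the key lemma: A's pipeline is B's single scan
theorem aChain_eq_scan (l : List Char) : aChain l = luceneScan l := by
  have main : ∀ n l, List.length l ≤ n → aChain l = luceneScan l := by
    intro n
    induction n with
    | zero =>
        intro l hl
        have : l = [] := by cases l <;> simp_all
        subst this; rfl
    | succ n ih =>
        intro l hl
        cases l with
        | nil => rfl
        | cons a t =>
            have ht : t.length ≤ n := by simpa using hl
            by_cases hbs : a = '\\'
            · subst hbs
              have hB : luceneScan ('\\' :: t) = '\\' :: '\\' :: luceneScan t := by
                cases t <;> simp [luceneScan]
              rw [hB, ← ih t ht]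
              simp [aChain, repl1_cons, scan2_cons_ne]
            · -- a ≠ '\\'
              by_cases hamp : a = '&' ∧ t.head? = some '&'
              · obtain ⟨ha, hhd⟩ := hamp; subst ha
                cases t with
                | nil => simp at hhd
                | cons b t' =>
                    have hb : b = '&' := by simpa using hhd
                    subst hb
                    have ht' : t'.length ≤ n := by
                      simp only [List.length_cons] at hl; omega
                    have hB : luceneScan ('&' :: '&' :: t') = '\\' :: '&' :: '&' :: luceneScan t' := by
                      simp [luceneScan]
                    rw [hB, ← ih t' ht']
                    simp [aChain, repl1_cons, scan2_cons_ne, scan2_pair]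
              · by_cases hbar : a = '|' ∧ t.head? = some '|'
                · obtain ⟨ha, hhd⟩ := hbar; subst ha
                  cases t with
                  | nil => simp at hhd
                  | cons b t' =>
                      have hb : b = '|' := by simpa using hhd
                      subst hb
                      have ht' : t'.length ≤ n := by
                        simp only [List.length_cons] at hl; omega
                      have hB : luceneScan ('|' :: '|' :: t') = '\\' :: '|' :: '|' :: luceneScan t' := by
                        simp [luceneScan]
                      rw [hB, ← ih t' ht']
                      simp [aChain, repl1_cons, scan2_cons_ne, scan2_pair]
                · -- no pair starts here
                  by_cases hA : a = '&'
                  · subst hA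
                    have hhd : t.head? ≠ some '&' := fun hc => hamp ⟨rfl, hc⟩
                    have hB : luceneScan ('&' :: t) = '&' :: luceneScan t := by
                      cases t with
                      | nil => rfl
                      | cons b t' =>
                          have hb : b ≠ '&' := by simpa using hhd
                          simp [luceneScan, hb, show ('&' : Char) ∉ luceneSingles by decide]
                    rw [hB, ← ih t ht]
                    have hX : (repl1 '-' (repl1 '+' (repl1 '\\' t))).head? ≠ some '&' :=
                      head_repl3_ne '&' (by decide) t hhd
                    simp [aChain, repl1_cons, scan2_cons_ne, scan2_cons_head _ _ hX]
                  · by_cases hBr : a = '|'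
                    · subst hBr
                      have hhd : t.head? ≠ some '|' := fun hc => hbar ⟨rfl, hc⟩
                      have hB : luceneScan ('|' :: t) = '|' :: luceneScan t := by
                        cases t with
                        | nil => rfl
                        | cons b t' =>
                            have hb : b ≠ '|' := by simpa using hhd
                            simp [luceneScan, hb, show ('|' : Char) ∉ luceneSingles by decide]
                      rw [hB, ← ih t ht]
                      have hX : (scan2 '&' (repl1 '-' (repl1 '+' (repl1 '\\' t)))).head? ≠ some '|' :=
                        head_scan2_ne '&' '|' (by decide) _ (head_repl3_ne '|' (by decide) t hhd)
                      simp [aChain, repl1_cons, scan2_cons_ne, scan2_cons_head _ _ hX]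
                    · by_cases hS : a ∈ luceneSingles
                      · -- one of the 16 single specials
                        have hB : luceneScan (a :: t) = '\\' :: a :: luceneScan t := by
                          cases t with
                          | nil => simp [luceneScan, hbs, hS]
                          | cons b t' =>
                              have h1 : ¬((a = '&' ∧ b = '&') ∨ (a = '|' ∧ b = '|')) := by
                                rintro (⟨h1, _⟩ | ⟨h1, _⟩) <;> subst h1 <;> revert hS <;> decide
                              simp [luceneScan, hbs, h1, hS]
                        rw [hB, ← ih t ht]
                        fin_cases hS <;>
                          simp [aChain, repl1_cons, scan2_cons_ne]
                      · -- plain character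
                        have hB : luceneScan (a :: t) = a :: luceneScan t := by
                          cases t with
                          | nil => simp [luceneScan, hbs, hS]
                          | cons b t' =>
                              have h1 : ¬((a = '&' ∧ b = '&') ∨ (a = '|' ∧ b = '|')) := by
                                rintro (⟨h1, _⟩ | _) <;> simp_all
                              simp [luceneScan, hbs, h1, hS]
                        rw [hB, ← ih t ht]
                        have hne : ∀ c ∈ luceneSingles, ¬(a = c) := by
                          intro c hc hac; exact hS (hac ▸ hc)
                        simp [aChain, repl1_cons, hbs,
                          hne '+' (by decide), hne '-' (by decide), hne '!' (by decide),
                          hne '(' (by decide), hne ')' (by decide), hne '{' (by decide),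
                          hne '}' (by decide), hne '[' (by decide), hne ']' (by decide),
                          hne '^' (by decide), hne '\"' (by decide), hne '~' (by decide),
                          hne '*' (by decide), hne '?' (by decide), hne ':' (by decide),
                          hne '/' (by decide),
                          scan2_cons_ne '&' a hA, scan2_cons_ne '|' a hBr]
  exact main l.length l (le_refl _)

-- ===== VERDICT (by name: the statement is the Claim_ definition above) =====
theorem escape_lucene_spec : Claim_equal_escape_lucene := by
  intro s _
  unfold Spec_escape_lucene escape_lucene escape_lucene_alt
  by_cases hemp : PySem.Str.len s = 0
  · rw [if_pos hemp]
    have h0 : s = "" := by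
      simpa [PySem.Str.len, PySem.Chars.len] using hemp
    subst h0; rfl
  · rw [if_neg hemp]
    simp only [List.foldl, PySem.Str.replace, String.toList_ofList]
    rw [show ("\\" : String).toList = ['\\'] from rfl,
        show ("\\\\" : String).toList = ['\\', '\\'] from rfl]
    rw [show ("+" : String).toList = ['+'] from rfl, show ("-" : String).toList = ['-'] from rfl,
        show ("&&" : String).toList = ['&', '&'] from rfl, show ("||" : String).toList = ['|', '|'] from rfl,
        show ("!" : String).toList = ['!'] from rfl, show ("(" : String).toList = ['('] from rfl,
        show (")" : String).toList = [')'] from rfl, show ("{" : String).toList = ['{'] from rfl,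
        show ("}" : String).toList = ['}'] from rfl, show ("[" : String).toList = ['['] from rfl,
        show ("]" : String).toList = [']'] from rfl, show ("^" : String).toList = ['^'] from rfl,
        show ("\"" : String).toList = ['\"'] from rfl, show ("~" : String).toList = ['~'] from rfl,
        show ("*" : String).toList = ['*'] from rfl, show ("?" : String).toList = ['?'] from rfl,
        show (":" : String).toList = [':'] from rfl, show ("/" : String).toList = ['/'] from rfl]
    rw [replace_single, replace_single, replace_double, replace_double,
        replace_single, replace_single, replace_single, replace_single, replace_single,
        replace_single, replace_single, replace_single, replace_single, replace_single,
        replace_single, replace_single, replace_single, replace_single, replace_single]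
    rw [← aChain, aChain_eq_scan]
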